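-- pv_equiv track=rewrite | github.com/asinusMZ/Lucas_Leonardo_EP2 | funcoes.py | calcula_pontos_sequencia_baixa
-- ===== SOURCE A (Python) =====
-- def calcula_pontos_sequencia_baixa(dados):
--     contador = 1
--     min = 7
--
--     for dado in dados:
--         if dado < min:
--             min = dado
--
--     atual = min
--     i = 0
--
--     while i < len(dados):
--         achou = False
--         for dado in dados:
--             if dado == (atual + 1):
--                 contador += 1
--                 atual = dado
--                 achou = True
--                 break
--         if not achou:
--             break
--         i += 1
--
--     if contador >= 4:
--         return 15
--     else:
--         return 0
-- ===== SOURCE B (Python) =====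
-- def calcula_pontos_sequencia_baixa(dados):
--     m = 7
--     for d in dados:
--         if d < m:
--             m = d
--     s = set(dados)
--     return 15 if (m + 1) in s and (m + 2) in s and (m + 3) in s else 0
-- ===== Notes on version B (the rewrite author's own statement) =====
-- stated objective: simpler
-- what changed: Replaces the bounded while-loop that counts a consecutive run (with an inner linear scan per step) by a closed-form membership test: after the same min-scan, return 15 iff m+1, m+2 and m+3 are all in the set of values.
import Mathlib
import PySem

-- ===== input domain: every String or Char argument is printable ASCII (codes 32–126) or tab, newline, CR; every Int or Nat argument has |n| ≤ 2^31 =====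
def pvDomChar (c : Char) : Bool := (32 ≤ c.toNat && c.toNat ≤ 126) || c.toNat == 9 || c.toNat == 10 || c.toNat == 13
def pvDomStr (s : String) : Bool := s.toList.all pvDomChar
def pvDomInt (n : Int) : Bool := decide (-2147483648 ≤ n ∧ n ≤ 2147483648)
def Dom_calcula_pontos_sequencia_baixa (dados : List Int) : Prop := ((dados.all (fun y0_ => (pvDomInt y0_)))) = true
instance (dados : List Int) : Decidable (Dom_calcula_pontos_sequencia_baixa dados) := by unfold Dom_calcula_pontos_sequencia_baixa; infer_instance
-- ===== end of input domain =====

-- B replaces A's run-counting while-loop (inner scan per step) by a direct membership test; objective: simpler.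
-- ===== PORT A =====
-- inner 'for dado in dados: if dado == atual+1: ... break' — returns the first match, none if no match
def pvA_findNext (atual : Int) : List Int → Option Int
  | [] => none
  | d :: rest => if d = atual + 1 then some d else pvA_findNext atual rest

-- the while loop: fuel = remaining iterations (i < len(dados)); state (contador, atual)
def pvA_loop (dados : List Int) : Nat → Int → Int → Int × Int
  | 0, contador, atual => (contador, atual)
  | n + 1, contador, atual =>
    match pvA_findNext atual dados with
    | some d => pvA_loop dados n (contador + 1) d
    | none => (contador, atual)

def calcula_pontos_sequencia_baixa (dados : List Int) : Int :=
  let mn := dados.foldl (fun m dado => if dado < m then dado else m) 7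
  let r := pvA_loop dados dados.length 1 mn
  if r.1 ≥ 4 then 15 else 0

-- ===== PORT B =====
def calcula_pontos_sequencia_baixa_alt (dados : List Int) : Int :=
  let m := dados.foldl (fun m d => if d < m then d else m) 7
  let s := PySem.Set.ofList dados
  if PySem.Set.contains s (m + 1) && PySem.Set.contains s (m + 2) && PySem.Set.contains s (m + 3) then 15 else 0

-- ===== PRECONDITION & SPEC =====
def Spec_calcula_pontos_sequencia_baixa (dados : List Int) (out : Int) : Prop := out = calcula_pontos_sequencia_baixa_alt dados
instance (dados : List Int) (out : Int) : Decidable (Spec_calcula_pontos_sequencia_baixa dados out) := by unfold Spec_calcula_pontos_sequencia_baixa; infer_instance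

-- ===== CLAIM (what is proved, stated in full; the proofs are below) =====
def Claim_equal_calcula_pontos_sequencia_baixa : Prop := ∀ (dados : List Int), Dom_calcula_pontos_sequencia_baixa dados → Spec_calcula_pontos_sequencia_baixa dados (calcula_pontos_sequencia_baixa dados)

-- ===== LEMMAS AND PROOFS =====

theorem pvA_findNext_eq_some {atual d : Int} {xs : List Int}
    (h : pvA_findNext atual xs = some d) : d = atual + 1 ∧ atual + 1 ∈ xs := by
  induction xs with
  | nil => simp [pvA_findNext] at h
  | cons x rest ih =>
    simp only [pvA_findNext] at h
    split at h
    · rename_i hx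
      cases h
      exact ⟨hx, by simp [hx]⟩
    · rcases ih h with ⟨h1, h2⟩
      exact ⟨h1, List.mem_cons_of_mem _ h2⟩

theorem pvA_findNext_of_mem {atual : Int} {xs : List Int}
    (h : atual + 1 ∈ xs) : pvA_findNext atual xs = some (atual + 1) := by
  induction xs with
  | nil => simp at h
  | cons x rest ih =>
    simp only [pvA_findNext]
    split
    · rename_i hx; rw [hx]
    · rename_i hx
      rcases List.mem_cons.1 h with h' | h'
      · exact absurd h'.symm hx
      · exact ih h'

theorem pvA_loop_ge (dados : List Int) (n : Nat) (c a : Int) :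
    c ≤ (pvA_loop dados n c a).1 := by
  induction n generalizing c a with
  | zero => simp [pvA_loop]
  | succ m ih =>
    simp only [pvA_loop]
    cases h : pvA_findNext a dados with
    | some d => exact le_trans (by omega) (ih (c + 1) d)
    | none => simp

theorem pvA_loop_le (dados : List Int) (n : Nat) (c a : Int) (k : Nat)
    (h : a + k + 1 ∉ dados) : (pvA_loop dados n c a).1 ≤ c + k := by
  induction n generalizing c a k with
  | zero =>
    simp only [pvA_loop]
    omega
  | succ m ih =>
    simp only [pvA_loop]
    cases hf : pvA_findNext a dados with
    | some d =>
      rcases pvA_findNext_eq_some hf with ⟨hd, hmem⟩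
      cases k with
      | zero =>
        exact absurd (by simpa using hmem) (by simpa using h)
      | succ k' =>
        subst hd
        have hnot : (a + 1) + (k' : Int) + 1 ∉ dados := by
          intro hc; apply h; convert hc using 1; push_cast; ring
        have := ih (c + 1) (a + 1) k' hnot
        push_cast at this ⊢
        omega
    | none =>
      simp only
      omega

theorem pv_len_ge_three {dados : List Int} {m : Int}
    (h1 : m + 1 ∈ dados) (h2 : m + 2 ∈ dados) (h3 : m + 3 ∈ dados) :
    3 ≤ dados.length := by
  have hsub : [m + 1, m + 2, m + 3] ⊆ dados := by
    intro x hx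
    fin_cases hx <;> assumption
  have hnd : ([m + 1, m + 2, m + 3] : List Int).Nodup := by
    simp
  simpa using (hnd.subperm hsub).length_le

theorem pv_main (dados : List Int) :
    Spec_calcula_pontos_sequencia_baixa dados (calcula_pontos_sequencia_baixa dados) := by
  unfold Spec_calcula_pontos_sequencia_baixa calcula_pontos_sequencia_baixa
    calcula_pontos_sequencia_baixa_alt
  dsimp only
  set m := dados.foldl (fun m d => if d < m then d else m) 7 with hm
  by_cases h1 : m + 1 ∈ dados
  · by_cases h2 : m + 2 ∈ dados
    · by_cases h3 : m + 3 ∈ dados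
      · -- all present: length ≥ 3, the loop performs at least 3 successful steps
        have hlen := pv_len_ge_three h1 h2 h3
        obtain ⟨k, hk⟩ : ∃ k, dados.length = k + 3 := ⟨dados.length - 3, by omega⟩
        have f1 : pvA_findNext m dados = some (m + 1) := pvA_findNext_of_mem h1
        have f2 : pvA_findNext (m + 1) dados = some (m + 2) := by
          have e : (m : Int) + 2 = (m + 1) + 1 := by omega
          have h2' := h2
          rw [e] at h2' ⊢
          exact pvA_findNext_of_mem h2'
        have f3 : pvA_findNext (m + 2) dados = some (m + 3) := by
          have e : (m : Int) + 3 = (m + 2) + 1 := by omega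
          have h3' := h3
          rw [e] at h3' ⊢
          exact pvA_findNext_of_mem h3'
        have hsteps : pvA_loop dados (k + 3) 1 m = pvA_loop dados k 4 (m + 3) := by
          simp only [pvA_loop, f1, f2, f3]
          norm_num
        have hge := pvA_loop_ge dados k 4 (m + 3)
        rw [hk, hsteps]
        rw [if_pos (by omega)]
        simp [PySem.Set.mem_ofList, h1, h2, h3]
      · have hnot : m + (2 : Nat) + 1 ∉ dados := by
          intro hc; apply h3; convert hc using 1; push_cast; ring
        have hle := pvA_loop_le dados dados.length 1 m 2 hnot
        rw [if_neg (by push_cast at hle; omega)]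
        simp [PySem.Set.mem_ofList, h3]
    · have hnot : m + (1 : Nat) + 1 ∉ dados := by
        intro hc; apply h2; convert hc using 1; push_cast; ring
      have hle := pvA_loop_le dados dados.length 1 m 1 hnot
      rw [if_neg (by push_cast at hle; omega)]
      simp [PySem.Set.mem_ofList, h2]
  · have hnot : m + (0 : Nat) + 1 ∉ dados := by
      intro hc; apply h1; convert hc using 1; push_cast; ring
    have hle := pvA_loop_le dados dados.length 1 m 0 hnot
    rw [if_neg (by push_cast at hle; omega)]
    simp [PySem.Set.mem_ofList, h1]

-- ===== VERDICT (by name: the statement is the Claim_ definition above) =====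
theorem calcula_pontos_sequencia_baixa_spec : Claim_equal_calcula_pontos_sequencia_baixa := by
  intro dados _
  exact pv_main dados
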